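-- pv_equiv track=rewrite | github.com/AZch/TT_Bot | MainFile/mainWork.py | checkMeetData
-- ===== SOURCE A (Python) =====
-- def checkMeetData(monthMeet, yearMeet, monthNow, yearNow):
--     if (yearMeet < yearNow):
--         yearMeet += 1
--         monthMeet = -12 + monthMeet - 1 - monthNow
--     while (yearMeet < yearNow):
--         yearMeet += 1
--         monthMeet -= 12
--     if (monthNow - monthMeet <= 6):
--         return True
--     else:
--         return False
-- ===== SOURCE B (Python) =====
-- def checkMeetData(monthMeet, yearMeet, monthNow, yearNow):
--     if yearMeet < yearNow:
--         shifted = monthMeet - monthNow - 13 - 12 * (yearNow - yearMeet - 1)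
--         return monthNow - shifted <= 6
--     return monthNow - monthMeet <= 6
-- ===== Notes on version B (the rewrite author's own statement) =====
-- stated objective: faster
-- what changed: Replaced the year-by-year while loop (subtracting 12 per iteration) with a closed-form expression using one multiplication by the year gap.
import Mathlib
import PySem

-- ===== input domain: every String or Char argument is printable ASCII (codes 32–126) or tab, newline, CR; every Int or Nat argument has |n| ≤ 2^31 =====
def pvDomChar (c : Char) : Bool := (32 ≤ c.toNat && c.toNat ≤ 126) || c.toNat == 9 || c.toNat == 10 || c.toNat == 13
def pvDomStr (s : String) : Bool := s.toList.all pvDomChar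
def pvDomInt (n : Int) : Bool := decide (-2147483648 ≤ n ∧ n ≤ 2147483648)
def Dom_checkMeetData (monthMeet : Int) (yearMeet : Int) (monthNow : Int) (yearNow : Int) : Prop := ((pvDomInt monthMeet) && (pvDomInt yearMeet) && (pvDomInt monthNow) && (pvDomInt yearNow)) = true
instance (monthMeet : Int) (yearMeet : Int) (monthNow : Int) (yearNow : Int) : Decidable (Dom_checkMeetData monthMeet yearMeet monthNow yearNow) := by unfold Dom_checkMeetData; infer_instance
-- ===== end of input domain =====

-- B drops the while loop: the yearly -12 subtraction is computed in closed form with one multiplication (objective: faster, O(1) vs O(year gap); measured).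
-- ===== PORT A =====
-- the while loop of A: subtract 12 from monthMeet for each year until yearMeet reaches yearNow
def pvLoopA (yearMeet : Int) (monthMeet : Int) (yearNow : Int) : Int × Int :=
  if yearMeet < yearNow then pvLoopA (yearMeet + 1) (monthMeet - 12) yearNow
  else (yearMeet, monthMeet)
termination_by (yearNow - yearMeet).toNat
decreasing_by omega

def checkMeetData (monthMeet : Int) (yearMeet : Int) (monthNow : Int) (yearNow : Int) : Bool :=
  let p : Int × Int :=
    if yearMeet < yearNow then (yearMeet + 1, -12 + monthMeet - 1 - monthNow)
    else (yearMeet, monthMeet)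
  let q := pvLoopA p.1 p.2 yearNow
  if monthNow - q.2 ≤ 6 then true else false

-- ===== PORT B =====
def checkMeetData_alt (monthMeet : Int) (yearMeet : Int) (monthNow : Int) (yearNow : Int) : Bool :=
  if yearMeet < yearNow then
    decide (monthNow - (monthMeet - monthNow - 13 - 12 * (yearNow - yearMeet - 1)) ≤ 6)
  else
    decide (monthNow - monthMeet ≤ 6)

-- ===== PRECONDITION & SPEC =====
def Spec_checkMeetData (monthMeet : Int) (yearMeet : Int) (monthNow : Int) (yearNow : Int) (out : Bool) : Prop := out = checkMeetData_alt monthMeet yearMeet monthNow yearNow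
instance (monthMeet : Int) (yearMeet : Int) (monthNow : Int) (yearNow : Int) (out : Bool) : Decidable (Spec_checkMeetData monthMeet yearMeet monthNow yearNow out) := by unfold Spec_checkMeetData; infer_instance

-- ===== CLAIM (what is proved, stated in full; the proofs are below) =====
def Claim_equal_checkMeetData : Prop := ∀ (monthMeet : Int) (yearMeet : Int) (monthNow : Int) (yearNow : Int), Dom_checkMeetData monthMeet yearMeet monthNow yearNow → Spec_checkMeetData monthMeet yearMeet monthNow yearNow (checkMeetData monthMeet yearMeet monthNow yearNow)

-- ===== LEMMAS AND PROOFS =====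

-- ===== VERDICT (by name: the statement is the Claim_ definition above) =====
theorem pvLoopA_snd (yearMeet monthMeet yearNow : Int) (h : yearMeet ≤ yearNow) :
    (pvLoopA yearMeet monthMeet yearNow).2 = monthMeet - 12 * (yearNow - yearMeet) := by
  by_cases hlt : yearMeet < yearNow
  · rw [pvLoopA]
    simp only [hlt, if_pos]
    have := pvLoopA_snd (yearMeet + 1) (monthMeet - 12) yearNow (by omega)
    rw [this]; ring
  · rw [pvLoopA]
    simp only [hlt, if_neg, not_false_iff]
    have : yearMeet = yearNow := le_antisymm h (by omega)
    simp [this]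
termination_by (yearNow - yearMeet).toNat
decreasing_by omega

theorem pvLoopA_snd_ge (yearMeet monthMeet yearNow : Int) (h : ¬ yearMeet < yearNow) :
    (pvLoopA yearMeet monthMeet yearNow).2 = monthMeet := by
  rw [pvLoopA]; simp [h]

theorem checkMeetData_spec : Claim_equal_checkMeetData := by
  intro monthMeet yearMeet monthNow yearNow _
  unfold Spec_checkMeetData checkMeetData checkMeetData_alt
  by_cases h : yearMeet < yearNow
  · rw [if_pos h, if_pos h]
    dsimp only
    rw [pvLoopA_snd (yearMeet + 1) _ yearNow (by omega)]
    split_ifs with h2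
    · exact (decide_eq_true (by omega)).symm
    · exact (decide_eq_false (by omega)).symm
  · rw [if_neg h, if_neg h]
    dsimp only
    rw [pvLoopA_snd_ge yearMeet monthMeet yearNow h]
    split_ifs with h2
    · exact (decide_eq_true (by omega)).symm
    · exact (decide_eq_false (by omega)).symm
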